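-- pv_equiv track=rewrite | github.com/Franka-Beyer/HSprakt | MakeCELEXDictFiles.py | create_lemform_dict
-- ===== SOURCE A (Python) =====
-- from typing import Dict, List
--
-- def create_lemform_dict(liste:List[str]) -> Dict[str, str]:
--     """
--     Erzeugt Dictionary, das Lemmata zu den zugehörigen Wortformen mappt.
--
--     :param liste: Liste von Strings der Form <Wortform>//<Lemma>
--     """
--     di = {}
--     for e in liste:
--         try:
--             f,l = e.split("\\")
--         except ValueError:
--             continue
--         if l not in di.keys():
--             di[l] = []
--             di[l].append(f)
--         else:
--             di[l].append(f)
--     return di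
-- ===== SOURCE B (Python) =====
-- def create_lemform_dict(liste):
--     pairs = []
--     for e in liste:
--         parts = e.split("\\")
--         if len(parts) == 2:
--             pairs.append((parts[1], parts[0]))  # (lemma, form)
--     return {l: [f for (l2, f) in pairs if l2 == l]
--             for l in dict.fromkeys(l for (l, _) in pairs)}
-- ===== Notes on version B (the rewrite author's own statement) =====
-- stated objective: alternative
-- what changed: B first extracts the (lemma, form) pairs in one pass, then builds the dict by a comprehension: deduplicated lemma keys in first-encounter order, each mapped to a per-key filter of the pair list, instead of A's incremental dict mutation with a membership test and append per element.
import Mathlib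
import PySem

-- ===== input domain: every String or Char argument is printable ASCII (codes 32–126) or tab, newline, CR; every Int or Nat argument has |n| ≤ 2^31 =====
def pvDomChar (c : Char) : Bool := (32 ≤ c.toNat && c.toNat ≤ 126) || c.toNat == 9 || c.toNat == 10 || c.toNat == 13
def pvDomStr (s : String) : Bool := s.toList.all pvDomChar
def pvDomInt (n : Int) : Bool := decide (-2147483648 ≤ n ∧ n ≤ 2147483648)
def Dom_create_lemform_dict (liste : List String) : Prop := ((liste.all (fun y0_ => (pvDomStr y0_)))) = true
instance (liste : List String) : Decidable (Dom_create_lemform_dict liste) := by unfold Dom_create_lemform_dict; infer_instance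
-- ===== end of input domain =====

-- B builds the (lemma, form) pairs first and then constructs the dict by a comprehension over the
-- deduplicated lemmas, instead of A's incremental dict mutation; return values proved equal on all inputs.

-- ===== PORT A =====
def create_lemform_dict (liste : List String) : List (String × List String) :=
  (liste.foldl (fun di e =>
    match PySem.Str.split? e "\\" with
    | some [f, l] =>
        if di.contains l = false then
          (di.insert l []).modify l [] (fun v => v ++ [f])
        else
          di.modify l [] (fun v => v ++ [f])
    | _ => di) PySem.Dict.empty).items

-- ===== PORT B =====
def lemformPairs (liste : List String) : List (String × String) :=
  liste.foldl (fun pairs e =>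
    let parts := (PySem.Str.split? e "\\").getD []
    if parts.length = 2 then pairs ++ [(parts[1]!, parts[0]!)] else pairs) []

def create_lemform_dict_alt (liste : List String) : List (String × List String) :=
  let pairs := lemformPairs liste
  (PySem.List.dedup (pairs.map (·.1))).map
    (fun l => (l, (pairs.filter (fun p => p.1 == l)).map (·.2)))

-- ===== PRECONDITION & SPEC =====
def Spec_create_lemform_dict (liste : List String) (out : List (String × List String)) : Prop := out = create_lemform_dict_alt liste
instance (liste : List String) (out : List (String × List String)) : Decidable (Spec_create_lemform_dict liste out) := by unfold Spec_create_lemform_dict; infer_instance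

-- ===== CLAIM (what is proved, stated in full; the proofs are below) =====
def Claim_equal_create_lemform_dict : Prop := ∀ (liste : List String), Dom_create_lemform_dict liste → Spec_create_lemform_dict liste (create_lemform_dict liste)

-- ===== LEMMAS AND PROOFS =====

-- The kept (lemma, form) pair an element contributes, if any.
def pairOf (e : String) : Option (String × String) :=
  match PySem.Str.split? e "\\" with
  | some [f, l] => some (l, f)
  | _ => none

-- B's pair accumulation is the filterMap of pairOf.
theorem lemformPairs_eq_filterMap (liste : List String) :
    lemformPairs liste = liste.filterMap pairOf := by
  suffices h : ∀ acc : List (String × String),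
      liste.foldl (fun pairs e =>
        let parts := (PySem.Str.split? e "\\").getD []
        if parts.length = 2 then pairs ++ [(parts[1]!, parts[0]!)] else pairs) acc
      = acc ++ liste.filterMap pairOf by
    unfold lemformPairs
    exact (h []).trans (List.nil_append _)
  induction liste with
  | nil => intro acc; simp
  | cons e rest ih =>
      intro acc
      rw [List.foldl_cons, ih, List.filterMap_cons]
      rcases hsp : PySem.Str.split? e "\\" with _ | ⟨_ | ⟨f, _ | ⟨l, _ | ⟨x, xs⟩⟩⟩⟩ <;>
        simp [pairOf, hsp]

-- A's per-element step equals one 'modify append' with default [].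
theorem stepA_eq_modify (di : PySem.Dict String (List String)) (l f : String) :
    (if di.contains l = false then
        (di.insert l []).modify l [] (fun v => v ++ [f])
      else
        di.modify l [] (fun v => v ++ [f]))
    = di.modify l [] (fun v => v ++ [f]) := by
  split_ifs with h
  · simp [PySem.Dict.modify, PySem.Dict.getD_insert_self, PySem.Dict.insert_insert_self,
      PySem.Dict.getD_of_not_contains di ([] : List String) h]
  · rfl

-- A's whole fold is the canonical 'modify append' fold over B's pair list.
theorem foldA_eq_fold_pairs (liste : List String) (d : PySem.Dict String (List String)) :
    liste.foldl (fun di e =>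
      match PySem.Str.split? e "\\" with
      | some [f, l] =>
          if di.contains l = false then
            (di.insert l []).modify l [] (fun v => v ++ [f])
          else
            di.modify l [] (fun v => v ++ [f])
      | _ => di) d
    = (liste.filterMap pairOf).foldl (fun di p => di.modify p.1 [] (fun v => v ++ [p.2])) d := by
  induction liste generalizing d with
  | nil => rfl
  | cons e rest ih =>
      rw [List.foldl_cons, ih, List.filterMap_cons]
      rcases hsp : PySem.Str.split? e "\\" with _ | ⟨_ | ⟨f, _ | ⟨l, _ | ⟨x, xs⟩⟩⟩⟩ <;>
        simp [pairOf, hsp, stepA_eq_modify]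

-- ===== VERDICT (by name: the statement is the Claim_ definition above) =====
theorem create_lemform_dict_spec : Claim_equal_create_lemform_dict := by
  intro liste _
  unfold Spec_create_lemform_dict create_lemform_dict create_lemform_dict_alt
  rw [foldA_eq_fold_pairs, lemformPairs_eq_filterMap]
  have hnd : ((liste.filterMap pairOf).foldl
      (fun di p => di.modify p.1 [] (fun v => v ++ [p.2])) PySem.Dict.empty).keys.Nodup := by
    exact PySem.Dict.nodup_keys_foldl_modify_key _ Prod.fst [] _ _ (by simp)
  rw [PySem.Dict.items_eq_map_keys _ hnd []]
  rw [PySem.Dict.keys_foldl_modify_key]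
  simp only [PySem.Dict.keys_empty, PySem.Set.update_nil_left, PySem.List.dedup_eq_ofList]
  refine List.map_congr_left ?_
  intro k _
  rw [PySem.Dict.getD_foldl_modify_append]
  simp
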